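-- pv_equiv track=rewrite | github.com/codeneo/prism | identical_subset_sigma/identical_sigma_subsets.py | is_identical_sigma_subset
-- ===== SOURCE A (Python) =====
-- from itertools import combinations
--
-- def is_identical_sigma_subset(n, numbers, k):
--     if n == k:
--         return "YES"
--     k_subsets = combinations(numbers, k)
--     summation = sum(next(k_subsets))
--     for subset in k_subsets:
--         if sum(subset) != summation:
--             return "NO"
--     return "YES"
-- ===== SOURCE B (Python) =====
-- def is_identical_sigma_subset(n, numbers, k):
--     if n == k:
--         return "YES"
--     if k < 0 or k > len(numbers):
--         raise ValueError("k must be between 0 and len(numbers)")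
--     if k == 0 or k == len(numbers):
--         return "YES"
--     return "YES" if all(x == numbers[0] for x in numbers) else "NO"
-- ===== Notes on version B (the rewrite author's own statement) =====
-- stated objective: faster
-- what changed: Replaced enumerating all C(n,k) k-combinations and comparing their sums with a single scan (all k-subset sums are equal iff k is 0 or len(numbers) or all elements are equal), plus explicit validation of k; intended as faster: measured 12x at n=16, and A times out at n=64 where B returns, so the largest-size ratio is unconfirmed.
import Mathlib
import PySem

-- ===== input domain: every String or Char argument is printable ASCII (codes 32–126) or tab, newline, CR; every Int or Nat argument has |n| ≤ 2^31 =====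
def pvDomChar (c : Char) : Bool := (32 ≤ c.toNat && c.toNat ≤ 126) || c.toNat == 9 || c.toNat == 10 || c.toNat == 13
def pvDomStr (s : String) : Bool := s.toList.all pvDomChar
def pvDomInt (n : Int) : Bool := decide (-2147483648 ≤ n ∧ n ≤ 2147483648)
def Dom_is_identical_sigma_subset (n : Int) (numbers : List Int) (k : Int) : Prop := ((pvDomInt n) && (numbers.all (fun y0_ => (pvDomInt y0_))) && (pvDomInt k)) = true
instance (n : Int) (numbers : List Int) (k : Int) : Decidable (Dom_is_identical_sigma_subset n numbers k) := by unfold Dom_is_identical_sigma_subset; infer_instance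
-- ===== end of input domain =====

-- B replaces enumeration of all k-combinations by a single scan: all k-subset sums are equal iff k ∈ {0, len} or all elements are equal (intended as faster; a timing run measured 12x at n=16 and A timed out at n=64).

-- ===== PORT A =====
-- itertools.combinations(numbers, k) as a list, in itertools order
def pvCombs : Nat → List Int → List (List Int)
  | 0, _ => [[]]
  | _+1, [] => []
  | kk+1, x :: xs => (pvCombs kk xs).map (fun s => x :: s) ++ pvCombs (kk+1) xs

def is_identical_sigma_subset (n : Int) (numbers : List Int) (k : Int) : String :=
  if n = k then "YES"
  else
    match pvCombs k.toNat numbers with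
    | [] => ""   -- Python raises StopIteration here (next() on empty iterator); outside Pre_
    | first :: rest =>
      let summation := first.sum
      -- the for-loop with early return "NO"
      if rest.all (fun subset => subset.sum == summation) then "YES" else "NO"

-- ===== PORT B =====
def is_identical_sigma_subset_alt (n : Int) (numbers : List Int) (k : Int) : String :=
  if n = k then "YES"
  else if k < 0 || (numbers.length : Int) < k then ""  -- raise ValueError (invalid k); outside Pre_
  else if k = 0 || k = (numbers.length : Int) then "YES"
  else
    -- all(x == numbers[0] for x in numbers): numbers[0] is evaluated lazily per element,
    -- so on [] the generator is empty and all(...) is vacuously True (headD never used)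
    if numbers.all (fun x => x == numbers.headD 0) then "YES" else "NO"

-- ===== PRECONDITION & SPEC =====
-- Pre_ excludes exactly the inputs where A raises: n ≠ k together with k < 0 (ValueError from
-- combinations) or k > len(numbers) (StopIteration from next() on an empty iterator).
def Pre_is_identical_sigma_subset (n : Int) (numbers : List Int) (k : Int) : Prop :=
  n = k ∨ (0 ≤ k ∧ k ≤ (numbers.length : Int))
instance (n : Int) (numbers : List Int) (k : Int) : Decidable (Pre_is_identical_sigma_subset n numbers k) := by unfold Pre_is_identical_sigma_subset; infer_instance

def pvWitness_is_identical_sigma_subset : Int × List Int × Int := (4, [1, 2, 1], 2)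

def Spec_is_identical_sigma_subset (n : Int) (numbers : List Int) (k : Int) (out : String) : Prop := out = is_identical_sigma_subset_alt n numbers k
instance (n : Int) (numbers : List Int) (k : Int) (out : String) : Decidable (Spec_is_identical_sigma_subset n numbers k out) := by unfold Spec_is_identical_sigma_subset; infer_instance

-- ===== CLAIM (what is proved, stated in full; the proofs are below) =====
def Claim_equal_is_identical_sigma_subset : Prop := ∀ (n : Int) (numbers : List Int) (k : Int), Dom_is_identical_sigma_subset n numbers k → Pre_is_identical_sigma_subset n numbers k → Spec_is_identical_sigma_subset n numbers k (is_identical_sigma_subset n numbers k)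

-- ===== LEMMAS AND PROOFS =====

theorem pvCombs_length_mem (k : Nat) (xs : List Int) (s : List Int)
    (h : s ∈ pvCombs k xs) : s.length = k := by
  induction xs generalizing k s with
  | nil =>
    cases k with
    | zero => simp [pvCombs] at h; simp [h]
    | succ kk => simp [pvCombs] at h
  | cons x xs ih =>
    cases k with
    | zero => simp [pvCombs] at h; simp [h]
    | succ kk =>
      simp only [pvCombs, List.mem_append, List.mem_map] at h
      rcases h with ⟨t, ht, rfl⟩ | h
      · simp [ih kk t ht]
      · exact ih (kk+1) s h

theorem pvCombs_subset (k : Nat) (xs : List Int) (s : List Int)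
    (h : s ∈ pvCombs k xs) : ∀ a ∈ s, a ∈ xs := by
  induction xs generalizing k s with
  | nil =>
    cases k with
    | zero => simp [pvCombs] at h; simp [h]
    | succ kk => simp [pvCombs] at h
  | cons x xs ih =>
    cases k with
    | zero => simp [pvCombs] at h; simp [h]
    | succ kk =>
      simp only [pvCombs, List.mem_append, List.mem_map] at h
      rcases h with ⟨t, ht, rfl⟩ | h
      · intro a ha
        rcases List.mem_cons.mp ha with rfl | ha
        · exact List.mem_cons_self
        · exact List.mem_cons_of_mem _ (ih kk t ht a ha)
      · intro a ha; exact List.mem_cons_of_mem _ (ih (kk+1) s h a ha)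

theorem take_mem_pvCombs (k : Nat) (xs : List Int) (h : k ≤ xs.length) :
    xs.take k ∈ pvCombs k xs := by
  induction xs generalizing k with
  | nil =>
    cases k with
    | zero => simp [pvCombs]
    | succ kk => simp at h
  | cons x xs ih =>
    cases k with
    | zero => simp [pvCombs]
    | succ kk =>
      simp only [List.length_cons, Nat.succ_le_succ_iff] at h
      simp only [pvCombs, List.take_succ_cons, List.mem_append, List.mem_map]
      exact Or.inl ⟨xs.take kk, ih kk h, rfl⟩

theorem pvCombs_nil_of_lt (k : Nat) (xs : List Int) (h : xs.length < k) :
    pvCombs k xs = [] := by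
  induction xs generalizing k with
  | nil =>
    cases k with
    | zero => omega
    | succ kk => rfl
  | cons x xs ih =>
    cases k with
    | zero => simp at h
    | succ kk =>
      simp only [List.length_cons] at h
      simp [pvCombs, ih kk (by omega), ih (kk+1) (by omega)]

theorem pvCombs_self (xs : List Int) : pvCombs xs.length xs = [xs] := by
  induction xs with
  | nil => simp [pvCombs]
  | cons x xs ih =>
    simp [List.length_cons, pvCombs, ih, pvCombs_nil_of_lt (xs.length+1) xs (by omega)]

theorem pvCombs_zero (xs : List Int) : pvCombs 0 xs = [[]] := by
  cases xs <;> rfl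

theorem erase_mem_pvCombs (xs : List Int) (a : Int) (h : a ∈ xs) :
    xs.erase a ∈ pvCombs (xs.length - 1) xs := by
  induction xs with
  | nil => simp at h
  | cons x xs ih =>
    by_cases hax : x = a
    · subst hax
      simp only [List.erase_cons_head, List.length_cons, Nat.add_sub_cancel]
      cases xs with
      | nil => simp [pvCombs_zero]
      | cons y ys =>
        simp only [List.length_cons, pvCombs, List.mem_append]
        right
        rw [show ys.length + 1 = (y :: ys).length from rfl, pvCombs_self]
        simp
    · have hmem : a ∈ xs := by
        rcases List.mem_cons.mp h with rfl | hm
        · exact absurd rfl hax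
        · exact hm
      have hxs : xs ≠ [] := List.ne_nil_of_mem hmem
      have hlen : 1 ≤ xs.length := List.length_pos_of_ne_nil hxs
      rw [List.erase_cons_tail (by simp [hax])]
      have h1 : (x :: xs).length - 1 = (xs.length - 1) + 1 := by
        simp only [List.length_cons]; omega
      rw [h1]
      simp only [pvCombs, List.mem_append, List.mem_map]
      exact Or.inl ⟨xs.erase a, ih hmem, rfl⟩

theorem sum_erase_int (xs : List Int) (a : Int) (h : a ∈ xs) :
    (xs.erase a).sum = xs.sum - a := by
  have := (List.perm_cons_erase h).sum_eq
  simp only [List.sum_cons] at this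
  omega

theorem sum_const_int (s : List Int) (a : Int) (h : ∀ x ∈ s, x = a) :
    s.sum = (s.length : Int) * a := by
  induction s with
  | nil => simp
  | cons y t ih =>
    have hy : y = a := h y List.mem_cons_self
    have ht : t.sum = (t.length : Int) * a := ih (fun x hx => h x (List.mem_cons_of_mem _ hx))
    simp [hy, ht]; ring

-- if two unequal elements exist and 0 < k < len, two k-subsets with different sums exist
theorem exists_ne_sums (xs : List Int) (k : Nat) (a b : Int)
    (hk0 : 0 < k) (hklen : k < xs.length) (ha : a ∈ xs) (hb : b ∈ xs) (hab : a ≠ b) :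
    ∃ s ∈ pvCombs k xs, ∃ t ∈ pvCombs k xs, s.sum ≠ t.sum := by
  induction xs generalizing k a b with
  | nil => simp at ha
  | cons x ys ih =>
    have hkys : k ≤ ys.length := by simp at hklen; omega
    by_cases hall : ∀ u ∈ ys, ∀ v ∈ ys, u = v
    · -- all of ys equal; a ≠ b forces x ≠ (common value), both subsets constructed directly
      have hxy : ∃ c, c ∈ ys ∧ x ≠ c := by
        rcases List.mem_cons.mp ha with rfl | ha'
        · rcases List.mem_cons.mp hb with rfl | hb'
          · exact absurd rfl hab
          · exact ⟨b, hb', hab⟩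
        · rcases List.mem_cons.mp hb with rfl | hb'
          · exact ⟨a, ha', fun h => hab h.symm⟩
          · exact absurd (hall a ha' b hb') hab
      rcases hxy with ⟨c, hc, hxc⟩
      have hallc : ∀ u ∈ ys, u = c := fun u hu => hall u hu c hc
      -- s = take k ys (sum k*c), t = x :: take (k-1) ys (sum x + (k-1)*c)
      refine ⟨ys.take k, ?_, x :: ys.take (k-1), ?_, ?_⟩
      · have := take_mem_pvCombs k ys hkys
        cases k with
        | zero => omega
        | succ kk =>
          simp only [pvCombs, List.mem_append]
          exact Or.inr this
      · cases k with
        | zero => omega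
        | succ kk =>
          simp only [Nat.add_sub_cancel, pvCombs, List.mem_append, List.mem_map]
          exact Or.inl ⟨ys.take kk, take_mem_pvCombs kk ys (by omega), rfl⟩
      · have hs : (ys.take k).sum = ((ys.take k).length : Int) * c :=
          sum_const_int _ c (fun u hu => hallc u (List.mem_of_mem_take hu))
        have ht : (ys.take (k-1)).sum = ((ys.take (k-1)).length : Int) * c :=
          sum_const_int _ c (fun u hu => hallc u (List.mem_of_mem_take hu))
        have hl1 : (ys.take k).length = k := List.length_take_of_le hkys
        have hl2 : (ys.take (k-1)).length = k - 1 := List.length_take_of_le (by omega)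
        simp only [List.sum_cons, hs, ht, hl1, hl2]
        intro heq
        have hcast : ((k : Int)) * c = x + ((k : Int) - 1) * c := by
          rw [heq]; congr 1; · push_cast [Nat.cast_sub (by omega : 1 ≤ k)]; ring_nf
        have : c = x := by linarith [hcast]
        exact hxc this.symm
    · push Not at hall
      rcases hall with ⟨u, hu, v, hv, huv⟩
      by_cases hlt : k < ys.length
      · rcases ih k u v hk0 hlt hu hv huv with ⟨s, hs, t, ht, hst⟩
        cases k with
        | zero => omega
        | succ kk =>
          refine ⟨s, ?_, t, ?_, hst⟩
          · simp only [pvCombs, List.mem_append]; exact Or.inr hs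
          · simp only [pvCombs, List.mem_append]; exact Or.inr ht
      · have hkeq : k = ys.length := by omega
        -- s = x :: ys.erase u, t = x :: ys.erase v
        have h1 : ys.erase u ∈ pvCombs (ys.length - 1) ys := erase_mem_pvCombs ys u hu
        have h2 : ys.erase v ∈ pvCombs (ys.length - 1) ys := erase_mem_pvCombs ys v hv
        cases k with
        | zero => omega
        | succ kk =>
          have hkk : kk = ys.length - 1 := by omega
          refine ⟨x :: ys.erase u, ?_, x :: ys.erase v, ?_, ?_⟩
          · simp only [pvCombs, List.mem_append, List.mem_map]
            exact Or.inl ⟨ys.erase u, by rw [hkk]; exact h1, rfl⟩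
          · simp only [pvCombs, List.mem_append, List.mem_map]
            exact Or.inl ⟨ys.erase v, by rw [hkk]; exact h2, rfl⟩
          · simp only [List.sum_cons, sum_erase_int ys u hu, sum_erase_int ys v hv]
            omega

-- ===== VERDICT (by name: the statement is the Claim_ definition above) =====
theorem all_sums_eq (xs : List Int) (k : Nat) (a : Int)
    (hall : ∀ x ∈ xs, x = a) (s : List Int) (hs : s ∈ pvCombs k xs) :
    s.sum = (k : Int) * a := by
  have h1 : s.length = k := pvCombs_length_mem k xs s hs
  have h2 : ∀ x ∈ s, x = a := fun x hx => hall x (pvCombs_subset k xs s hs x hx)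
  rw [sum_const_int s a h2, h1]

theorem is_identical_sigma_subset_spec : Claim_equal_is_identical_sigma_subset := by
  intro n numbers k _ hpre
  unfold Spec_is_identical_sigma_subset
  unfold is_identical_sigma_subset is_identical_sigma_subset_alt
  by_cases hnk : n = k
  · simp [hnk]
  · have hk : 0 ≤ k ∧ k ≤ (numbers.length : Int) := by
      rcases hpre with h | h
      · exact absurd h hnk
      · exact h
    have hg1 : ¬ k < 0 := by omega
    have hg2 : ¬ (numbers.length : Int) < k := by omega
    simp only [if_neg hnk, hg1, hg2, decide_false, Bool.or_self,
      Bool.false_eq_true, if_false]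
    set kn := k.toNat with hkn
    have hkcast : (kn : Int) = k := Int.toNat_of_nonneg hk.1
    have hknle : kn ≤ numbers.length := by omega
    by_cases hk0 : k = 0
    · have : kn = 0 := by omega
      simp [this, pvCombs_zero, hk0, List.all_nil]
    · by_cases hklen : k = (numbers.length : Int)
      · have : kn = numbers.length := by omega
        rw [this, pvCombs_self]
        simp [hklen]
      · -- 0 < kn < numbers.length
        have hlt : kn < numbers.length := by omega
        have hpos : 0 < kn := by omega
        have hne0 : pvCombs kn numbers ≠ [] := by
          intro hnil
          have := take_mem_pvCombs kn numbers hknle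
          rw [hnil] at this
          simp at this
        obtain ⟨first, rest, hcons⟩ := List.exists_cons_of_ne_nil hne0
        rw [hcons]
        have hnnil : numbers ≠ [] := by
          intro h; subst h; simp at hlt
        by_cases hall : ∀ x ∈ numbers, x = numbers.headD 0
        · have hA : rest.all (fun subset => subset.sum == first.sum) = true := by
            rw [List.all_eq_true]
            intro s hs
            have hs' : s ∈ pvCombs kn numbers := by rw [hcons]; exact List.mem_cons_of_mem _ hs
            have hf' : first ∈ pvCombs kn numbers := by rw [hcons]; exact List.mem_cons_self
            rw [all_sums_eq numbers kn _ hall s hs', all_sums_eq numbers kn _ hall first hf']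
            simp
          have hB : numbers.all (fun x => x == numbers.headD 0) = true := by
            rw [List.all_eq_true]; intro x hx; simpa using hall x hx
          simp only [hA, hB, if_true]
          simp [hk0, hklen]
        · push Not at hall
          rcases hall with ⟨b, hb, hbne⟩
          have hhead : numbers.headD 0 ∈ numbers := by
            cases numbers with
            | nil => exact absurd rfl hnnil
            | cons y ys => exact List.mem_cons_self
          obtain ⟨s, hs, t, ht, hst⟩ :=
            exists_ne_sums numbers kn b (numbers.headD 0) hpos hlt hb hhead hbne
          have hA : rest.all (fun subset => subset.sum == first.sum) = false := by
            by_contra hcon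
            rw [Bool.not_eq_false, List.all_eq_true] at hcon
            have key : ∀ u ∈ pvCombs kn numbers, u.sum = first.sum := by
              intro u hu
              rw [hcons] at hu
              rcases List.mem_cons.mp hu with rfl | hu
              · rfl
              · simpa using hcon u hu
            exact hst ((key s hs).trans (key t ht).symm)
          have hB : numbers.all (fun x => x == numbers.headD 0) = false := by
            rw [Bool.eq_false_iff]
            intro hcon
            rw [List.all_eq_true] at hcon
            exact hbne (by simpa using hcon b hb)
          simp only [hA, hB, Bool.false_eq_true, if_false]
          simp [hk0, hklen]
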